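-- pv_equiv track=rewrite | github.com/geektutor/Leaderboard | python/day 28.py | count_magic
-- ===== SOURCE A (Python) =====
-- def count_magic(year):
--     '''
--     This function takes in an integer representing a year and returns
--     a list of all magic dates in that year.
--     '''
--     assert type(year)==int and year > 0, 'Invalid year entered.'
--     yy = int(str(year)[-2:])
--     magic_code = ()
--     leap = True if int(year)%4==0 and int(year) not in [1800,1900,2100,2200,2300] else False
--     for i in range(1,13):
--         for j in range(1,32):
--             if i==2 and leap and j>29:
--                 break
--             elif i==2 and not leap and j>28:
--                 break
--             elif i in [4,9,11] and j>30:
--                 break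
--             if i*j==yy:
--                 magic_code+=((i,j),)
--     dates = []
--     to_month={1: 'January',
--      2: 'February',
--      3: 'March',
--      4: 'April',
--      5: 'May',
--      6: 'June',
--      7: 'July',
--      8: 'August',
--      9: 'September',
--      10: 'October',
--      11: 'November',
--      12: 'December'}
--     for code in magic_code:
--         d = f'{to_month[code[0]]} {code[1]},{year}'
--         dates.append(d)
--     return dates
-- ===== SOURCE B (Python) =====
-- def count_magic(year):
--     '''
--     Magic dates of a year: month*day == last two digits of the year.
--     Instead of scanning all 12x31 (month, day) cells, enumerate the months as
--     divisors of yy: day = yy // i, kept when it fits in the month.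
--     '''
--     assert type(year) == int and year > 0, 'Invalid year entered.'
--     yy = int(str(year)[-2:])
--     leap = year % 4 == 0 and year not in [1800, 1900, 2100, 2200, 2300]
--     months = ['January', 'February', 'March', 'April', 'May', 'June', 'July',
--               'August', 'September', 'October', 'November', 'December']
--     dates = []
--     for i in range(1, 13):
--         if yy % i == 0:
--             day = yy // i
--             max_days = (29 if leap else 28) if i == 2 else 30 if i in (4, 9, 11) else 31
--             if 1 <= day <= max_days:
--                 dates.append(f'{months[i-1]} {day},{year}')
--     return dates
-- ===== Notes on version B (the rewrite author's own statement) =====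
-- stated objective: faster
-- what changed: B enumerates each month i as a divisor of yy (day = yy//i, kept iff it fits the month) instead of A's brute-force scan of all 12x31 (month, day) cells; it also builds the date strings in the same single pass instead of A's second formatting loop.
import Mathlib
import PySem

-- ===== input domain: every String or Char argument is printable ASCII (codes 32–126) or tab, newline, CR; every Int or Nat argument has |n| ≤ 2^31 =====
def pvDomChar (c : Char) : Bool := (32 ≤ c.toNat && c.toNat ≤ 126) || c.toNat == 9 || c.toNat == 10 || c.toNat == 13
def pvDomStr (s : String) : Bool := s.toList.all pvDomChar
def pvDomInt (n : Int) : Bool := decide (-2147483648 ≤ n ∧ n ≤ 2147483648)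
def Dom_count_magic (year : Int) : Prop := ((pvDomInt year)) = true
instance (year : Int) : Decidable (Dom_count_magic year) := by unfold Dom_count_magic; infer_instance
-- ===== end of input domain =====

-- B replaces A's scan of all 12×31 (month, day) cells by 12 divisor checks (day = yy // i) and
-- formats each date in the same single pass instead of A's second formatting loop.

-- ===== PORT A =====
def pvMonthDict : PySem.Dict Int String := PySem.Dict.ofList
  [(1,"January"),(2,"February"),(3,"March"),(4,"April"),(5,"May"),(6,"June"),(7,"July"),
   (8,"August"),(9,"September"),(10,"October"),(11,"November"),(12,"December")]

-- the if/elif/elif break tests of A's inner loop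
def pvBreak (i : Int) (leap : Bool) (j : Int) : Bool :=
  (i == 2 && leap && decide (29 < j)) || (i == 2 && !leap && decide (28 < j)) ||
  ((i == 4 || i == 9 || i == 11) && decide (30 < j))

-- A's inner 'for j in range(1,32)' with its breaks; tuple '+=' is append
def pvInnerA (yy : Int) (leap : Bool) (i : Int) : List Int → List (Int × Int)
  | [] => []
  | j :: rest =>
      if pvBreak i leap j then []
      else (if i * j == yy then [(i, j)] else []) ++ pvInnerA yy leap i rest

-- f'{to_month[code[0]]} {code[1]},{year}' (to_month has keys 1..12, so the default is unreachable)
def pvFmtA (year : Int) (code : Int × Int) : String :=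
  PySem.Dict.getD pvMonthDict code.1 "" ++ " " ++ PySem.Int.toStr code.2 ++ "," ++ PySem.Int.toStr year

def count_magic (year : Int) : List String :=
  -- int(str(year)[-2:]): under Pre_ (year > 0) the slice is a nonempty digit string, so int() never
  -- raises and the .getD 0 default is unreachable
  let yy : Int := (PySem.Int.ofStr? (PySem.Str.slice (PySem.Int.toStr year) (some (-2)) none)).getD 0
  let leap : Bool := PySem.Int.mod year 4 == 0 && !(([1800,1900,2100,2200,2300] : List Int).contains year)
  let magic_code : List (Int × Int) :=
    (PySem.List.pyRange 1 13 1).foldl (fun acc i => acc ++ pvInnerA yy leap i (PySem.List.pyRange 1 32 1)) []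
  magic_code.foldl (fun acc code => acc ++ [pvFmtA year code]) []

-- ===== PORT B =====
def pvMonthList : List String :=
  ["January","February","March","April","May","June","July","August","September","October","November","December"]

-- (29 if leap else 28) if i == 2 else 30 if i in (4, 9, 11) else 31
def pvMaxDays (leap : Bool) (i : Int) : Int :=
  if i == 2 then (if leap then 29 else 28)
  else if i == 4 || i == 9 || i == 11 then 30 else 31

-- f'{months[i-1]} {day},{year}' (i-1 is in range 0..11, so the default is unreachable)
def pvFmtB (year i day : Int) : String :=
  PySem.List.pyGetD pvMonthList (i - 1) "" ++ " " ++ PySem.Int.toStr day ++ "," ++ PySem.Int.toStr year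

def count_magic_alt (year : Int) : List String :=
  -- same yy / leap computations as Source B (identical to A's); the .getD 0 default is unreachable for year > 0
  let yy : Int := (PySem.Int.ofStr? (PySem.Str.slice (PySem.Int.toStr year) (some (-2)) none)).getD 0
  let leap : Bool := PySem.Int.mod year 4 == 0 && !(([1800,1900,2100,2200,2300] : List Int).contains year)
  (PySem.List.pyRange 1 13 1).foldl (fun acc i =>
    if PySem.Int.mod yy i == 0 then
      let day := PySem.Int.floordiv yy i
      if decide (1 ≤ day) && decide (day ≤ pvMaxDays leap i) then acc ++ [pvFmtB year i day] else acc
    else acc) []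

-- ===== PRECONDITION & SPEC =====
-- A asserts year > 0 (AssertionError otherwise); Pre_ admits exactly the inputs on which A returns.
def Pre_count_magic (year : Int) : Prop := 0 < year
instance (year : Int) : Decidable (Pre_count_magic year) := by unfold Pre_count_magic; infer_instance
def pvWitness_count_magic : Int := 2025

def Spec_count_magic (year : Int) (out : List String) : Prop := out = count_magic_alt year
instance (year : Int) (out : List String) : Decidable (Spec_count_magic year out) := by unfold Spec_count_magic; infer_instance

-- ===== CLAIM (what is proved, stated in full; the proofs are below) =====
def Claim_equal_count_magic : Prop := ∀ (year : Int), Dom_count_magic year → Pre_count_magic year → Spec_count_magic year (count_magic year)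

-- ===== LEMMAS AND PROOFS =====

-- A's inner loop over an ascending range, when its break tests amount to 'md < j', collects exactly
-- the j ≤ md with i*j = yy: once the break fires, every later j of the range would be filtered anyway.
theorem pvInnerA_pyRange (yy i md : Int) (leap : Bool) :
    ∀ (n : Nat) (a : Int),
      (∀ j, a ≤ j → j < a + n → pvBreak i leap j = decide (md < j)) →
      pvInnerA yy leap i (PySem.List.pyRange a (a + n) 1)
        = ((PySem.List.pyRange a (a + n) 1).filter
            (fun j => decide (j ≤ md) && (i * j == yy))).map (fun j => (i, j)) := by
  intro n
  induction n with
  | zero =>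
      intro a _
      simp [PySem.List.pyRange_one_eq_nil (le_refl a), pvInnerA]
  | succ n ih =>
      intro a hb
      have ha : a < a + (n+1 : Nat) := by push_cast; omega
      rw [PySem.List.pyRange_one_cons ha]
      have hba : pvBreak i leap a = decide (md < a) := hb a le_rfl ha
      by_cases hmd : md < a
      · have : pvBreak i leap a = true := by rw [hba]; simp [hmd]
        rw [pvInnerA, if_pos this]
        have hnil : (PySem.List.pyRange (a+1) (a + ((n:Int)+1)) 1).filter
            (fun j => decide (j ≤ md) && (i * j == yy)) = [] := by
          apply List.filter_eq_nil_iff.mpr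
          intro j hj
          have := (PySem.List.mem_pyRange_one).mp hj
          simp
          omega
        have hcast : a + ((n+1 : Nat) : Int) = a + ((n:Int)+1) := by push_cast; ring
        rw [hcast] at *
        simp [(show ¬ a ≤ md by omega), hnil]
      · have hfalse : pvBreak i leap a = false := by rw [hba]; simp [hmd]
        rw [pvInnerA, if_neg (by simp [hfalse])]
        have harange : a + (n+1 : Nat) = (a + 1) + (n : Nat) := by push_cast; ring
        have ih' := ih (a+1) (by intro j h1 h2; apply hb j (by omega) (by push_cast at h2 ⊢; omega))
        rw [harange, ih']
        rw [List.filter_cons]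
        by_cases hm : i * a == yy
        · simp [hm, (show a ≤ md by omega)]
        · simp at hm
          simp [hm]

-- the filtered range is [yy/i] when i divides yy and the quotient lands in [1, min md n], else []
theorem pvFilter_range (i yy md : Int) (hi : 0 < i) : ∀ (n : Nat),
    ((PySem.List.pyRange 1 ((n : Int) + 1) 1).filter (fun j => decide (j ≤ md) && (i * j == yy)))
      = if yy % i = 0 ∧ 1 ≤ yy / i ∧ yy / i ≤ min md (n : Int) then [yy / i] else [] := by
  intro n
  induction n with
  | zero =>
      rw [PySem.List.pyRange_one_eq_nil (by norm_num)]
      simp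
      intro _ h1 h2
      omega
  | succ n ih =>
      have hsplit : ((n+1 : Nat) : Int) + 1 = ((n:Int) + 1) + 1 := by push_cast; ring
      rw [hsplit, PySem.List.pyRange_one_succ_right (by omega), List.filter_append, ih]
      have hdm := Int.emod_add_mul_ediv yy i
      by_cases hm : i * ((n:Int)+1) = yy
      · have hq : yy / i = (n:Int)+1 := by
          rw [← hm, Int.mul_ediv_cancel_left _ (by omega)]
        have hr : yy % i = 0 := by rw [← hm]; exact Int.mul_emod_right i _
        by_cases hle : (n:Int)+1 ≤ md
        · rw [if_neg (by omega), if_pos (by refine ⟨hr, by omega, by omega⟩)]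
          simp [hle, hm, hq]
        · rw [if_neg (by omega), if_neg (by omega)]
          simp
          intro h
          omega
      · have htail : ([(n:Int)+1].filter (fun j => decide (j ≤ md) && (i * j == yy))) = [] := by
          simp [hm]
        rw [htail, List.append_nil]
        push_cast
        by_cases hc : yy % i = 0 ∧ 1 ≤ yy / i ∧ yy / i ≤ min md ((n:Int)+1)
        · have : yy / i ≠ (n:Int)+1 := by
            intro he
            apply hm
            rw [← hdm, hc.1, he]
            ring
          rw [if_pos (by omega), if_pos hc]
        · rw [if_neg (by omega), if_neg hc]

-- month i of A's scan, mapped through A's formatter, is exactly B's contribution for i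
theorem pvMonth (year yy : Int) (leap : Bool) (i : Int)
    (hi : 0 < i) (hmd1 : 1 ≤ pvMaxDays leap i) (hmd31 : pvMaxDays leap i ≤ 31)
    (hb : ∀ j, 1 ≤ j → j < 32 → pvBreak i leap j = decide (pvMaxDays leap i < j))
    (hname : PySem.Dict.getD pvMonthDict i "" = PySem.List.pyGetD pvMonthList (i-1) "") :
    (pvInnerA yy leap i (PySem.List.pyRange 1 32 1)).map (pvFmtA year)
      = (if PySem.Int.mod yy i == 0 then
          (if decide (1 ≤ PySem.Int.floordiv yy i) && decide (PySem.Int.floordiv yy i ≤ pvMaxDays leap i)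
            then [pvFmtB year i (PySem.Int.floordiv yy i)] else [])
         else []) := by
  have h32 : (32 : Int) = 1 + ((31 : Nat) : Int) := by norm_num
  rw [h32, pvInnerA_pyRange yy i (pvMaxDays leap i) leap 31 1
        (by intro j h1 h2; exact hb j h1 (by push_cast at h2 ⊢; omega))]
  rw [show (1 : Int) + ((31:Nat):Int) = ((31:Nat):Int) + 1 by ring, pvFilter_range i yy _ hi 31]
  rw [show min (pvMaxDays leap i) ((31:Nat):Int) = pvMaxDays leap i by push_cast; omega]
  rw [PySem.Int.mod_eq_emod_of_pos hi, PySem.Int.floordiv_eq_ediv_of_pos hi]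
  by_cases h1 : yy % i = 0
  · by_cases h2 : 1 ≤ yy / i ∧ yy / i ≤ pvMaxDays leap i
    · rw [if_pos ⟨h1, h2.1, h2.2⟩]
      simp [h1, h2.1, h2.2, pvFmtA, pvFmtB, hname]
    · rw [if_neg (by tauto)]
      simp [h1]
      omega
  · rw [if_neg (by tauto)]
    simp [h1]

-- A = B for every Int year (the Python-level difference is only that both assert year > 0)
theorem pvMain_eq (year : Int) : count_magic year = count_magic_alt year := by
  unfold count_magic count_magic_alt
  generalize (PySem.Int.ofStr? (PySem.Str.slice (PySem.Int.toStr year) (some (-2)) none)).getD 0 = yy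
  generalize (PySem.Int.mod year 4 == 0 && !(([1800,1900,2100,2200,2300] : List Int).contains year)) = leap
  dsimp only
  rw [PySem.List.foldl_append_singleton_eq_map, PySem.List.foldl_append_eq_flatMap]
  have hfun : (fun (acc : List String) (i : Int) =>
      if PySem.Int.mod yy i == 0 then
        if decide (1 ≤ PySem.Int.floordiv yy i) && decide (PySem.Int.floordiv yy i ≤ pvMaxDays leap i)
          then acc ++ [pvFmtB year i (PySem.Int.floordiv yy i)] else acc
      else acc)
      = (fun acc i => acc ++
          (if PySem.Int.mod yy i == 0 then
            (if decide (1 ≤ PySem.Int.floordiv yy i) && decide (PySem.Int.floordiv yy i ≤ pvMaxDays leap i)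
              then [pvFmtB year i (PySem.Int.floordiv yy i)] else [])
           else [])) := by
    funext acc i
    dsimp only
    split_ifs <;> simp
  rw [hfun, PySem.List.foldl_append_eq_flatMap]
  simp only [List.nil_append, List.map_flatMap]
  have hr : PySem.List.pyRange 1 13 1 = [1,2,3,4,5,6,7,8,9,10,11,12] := by decide
  rw [hr]
  simp only [List.flatMap_cons, List.flatMap_nil, List.append_nil]
  have hb2 : ∀ j : Int, 1 ≤ j → j < 32 → pvBreak 2 leap j = decide (pvMaxDays leap 2 < j) := by
    intro j h1 h2; cases leap <;> simp [pvBreak, pvMaxDays]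
  rw [pvMonth year yy leap 1 (by norm_num) (by cases leap <;> decide) (by cases leap <;> decide)
        (by intro j h1 h2; simp [pvBreak, pvMaxDays]; omega) (by decide),
      pvMonth year yy leap 2 (by norm_num) (by cases leap <;> decide) (by cases leap <;> decide)
        hb2 (by decide),
      pvMonth year yy leap 3 (by norm_num) (by cases leap <;> decide) (by cases leap <;> decide)
        (by intro j h1 h2; simp [pvBreak, pvMaxDays]; omega) (by decide),
      pvMonth year yy leap 4 (by norm_num) (by cases leap <;> decide) (by cases leap <;> decide)
        (by intro j h1 h2; simp [pvBreak, pvMaxDays]) (by decide),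
      pvMonth year yy leap 5 (by norm_num) (by cases leap <;> decide) (by cases leap <;> decide)
        (by intro j h1 h2; simp [pvBreak, pvMaxDays]; omega) (by decide),
      pvMonth year yy leap 6 (by norm_num) (by cases leap <;> decide) (by cases leap <;> decide)
        (by intro j h1 h2; simp [pvBreak, pvMaxDays]; omega) (by decide),
      pvMonth year yy leap 7 (by norm_num) (by cases leap <;> decide) (by cases leap <;> decide)
        (by intro j h1 h2; simp [pvBreak, pvMaxDays]; omega) (by decide),
      pvMonth year yy leap 8 (by norm_num) (by cases leap <;> decide) (by cases leap <;> decide)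
        (by intro j h1 h2; simp [pvBreak, pvMaxDays]; omega) (by decide),
      pvMonth year yy leap 9 (by norm_num) (by cases leap <;> decide) (by cases leap <;> decide)
        (by intro j h1 h2; simp [pvBreak, pvMaxDays]) (by decide),
      pvMonth year yy leap 10 (by norm_num) (by cases leap <;> decide) (by cases leap <;> decide)
        (by intro j h1 h2; simp [pvBreak, pvMaxDays]; omega) (by decide),
      pvMonth year yy leap 11 (by norm_num) (by cases leap <;> decide) (by cases leap <;> decide)
        (by intro j h1 h2; simp [pvBreak, pvMaxDays]) (by decide),
      pvMonth year yy leap 12 (by norm_num) (by cases leap <;> decide) (by cases leap <;> decide)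
        (by intro j h1 h2; simp [pvBreak, pvMaxDays]; omega) (by decide)]

-- ===== VERDICT (by name: the statement is the Claim_ definition above) =====
theorem count_magic_spec : Claim_equal_count_magic := by
  intro year _ _
  unfold Spec_count_magic
  exact pvMain_eq year
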